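-- pv_equiv track=rewrite | github.com/KasraAhmadi/Tau_NAF_Conversion_Error_Detection | Simulation/Double_Tau_Naf_new.py | coherency_checker
-- ===== SOURCE A (Python) =====
-- def coherency_checker(zero_counter,positive_counter,negative_counter,array,
--                       zero_checker=False,negative_checker=False,positive_checker=False):
--     zero_loop_counter = 0
--     positive_loop_counter = 0
--     negative_loop_counter = 0
--
--     for element in array:
--         if (element == 0):
--             zero_loop_counter += 1
--         elif(element == 1):
--             positive_loop_counter += 1
--         elif(element == -1):
--             negative_loop_counter += 1
--     if(zero_checker):
--         if(zero_loop_counter != zero_counter):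
--             return False
--     if(negative_checker):
--         if(negative_loop_counter != negative_counter):
--             return False
--     if(positive_checker):
--         if(positive_loop_counter != positive_counter):
--             return False
--     return True
-- ===== SOURCE B (Python) =====
-- def coherency_checker(zero_counter, positive_counter, negative_counter, array,
--                       zero_checker=False, negative_checker=False, positive_checker=False):
--     # Budget-decrement scan: treat the expected counters as remaining budgets for the
--     # enabled categories, abort as soon as a budget is exhausted, require 0 at the end.
--     remaining_zero = zero_counter
--     remaining_pos = positive_counter
--     remaining_neg = negative_counter
--     for element in array:
--         if zero_checker and element == 0:
--             if remaining_zero == 0: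
--                 return False
--             remaining_zero -= 1
--         elif positive_checker and element == 1:
--             if remaining_pos == 0:
--                 return False
--             remaining_pos -= 1
--         elif negative_checker and element == -1:
--             if remaining_neg == 0:
--                 return False
--             remaining_neg -= 1
--     return ((not zero_checker or remaining_zero == 0)
--             and (not negative_checker or remaining_neg == 0)
--             and (not positive_checker or remaining_pos == 0))
-- ===== Notes on version B (the rewrite author's own statement) =====
-- stated objective: alternative
-- what changed: Replaced A's tally-then-compare (one pass accumulating three counts, then three comparisons) with a budget-decrement scan: the expected counters become remaining budgets for the enabled categories, the scan decrements them and terminates early as soon as an enabled budget is exhausted by a further matching element, and the end-of-list check only requires the enabled budgets to be exactly zero.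
import Mathlib
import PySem

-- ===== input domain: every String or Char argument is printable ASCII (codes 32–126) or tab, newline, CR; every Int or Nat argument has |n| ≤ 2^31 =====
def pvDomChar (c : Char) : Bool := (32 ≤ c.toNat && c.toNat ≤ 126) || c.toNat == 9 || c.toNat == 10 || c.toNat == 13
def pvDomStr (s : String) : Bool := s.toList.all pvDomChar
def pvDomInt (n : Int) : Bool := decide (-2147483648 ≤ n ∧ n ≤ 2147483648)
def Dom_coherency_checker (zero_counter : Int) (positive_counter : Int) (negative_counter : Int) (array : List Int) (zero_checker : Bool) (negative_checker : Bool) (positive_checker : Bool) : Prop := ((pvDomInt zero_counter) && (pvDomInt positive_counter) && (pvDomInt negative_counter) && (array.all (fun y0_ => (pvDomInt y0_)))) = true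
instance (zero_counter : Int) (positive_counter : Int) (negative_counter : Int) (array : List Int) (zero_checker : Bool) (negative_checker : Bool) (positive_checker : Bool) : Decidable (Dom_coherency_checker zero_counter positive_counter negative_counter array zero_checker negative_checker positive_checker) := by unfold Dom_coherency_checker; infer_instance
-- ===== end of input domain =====

-- ===== PORT A =====
-- B replaces A's tally-then-compare pass by a budget-decrement scan with early exit (objective: alternative).
def coherency_checker (zero_counter : Int) (positive_counter : Int) (negative_counter : Int) (array : List Int) (zero_checker : Bool) (negative_checker : Bool) (positive_checker : Bool) : Bool :=
  let counts := array.foldl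
    (fun (acc : Int × Int × Int) element =>
      if element == 0 then (acc.1 + 1, acc.2.1, acc.2.2)
      else if element == 1 then (acc.1, acc.2.1 + 1, acc.2.2)
      else if element == -1 then (acc.1, acc.2.1, acc.2.2 + 1)
      else acc)
    ((0 : Int), (0 : Int), (0 : Int))
  if zero_checker && counts.1 != zero_counter then false
  else if negative_checker && counts.2.2 != negative_counter then false
  else if positive_checker && counts.2.1 != positive_counter then false
  else true

-- ===== PORT B =====
-- the for-loop with mid-loop 'return False' of Source B, as structural recursion over the list
def cohGo (zero_checker : Bool) (negative_checker : Bool) (positive_checker : Bool) :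
    List Int → Int → Int → Int → Bool
  | [], rz, rn, rp =>
      (!zero_checker || rz == 0) && (!negative_checker || rn == 0) && (!positive_checker || rp == 0)
  | element :: rest, rz, rn, rp =>
      if zero_checker && element == 0 then
        if rz == 0 then false
        else cohGo zero_checker negative_checker positive_checker rest (rz - 1) rn rp
      else if positive_checker && element == 1 then
        if rp == 0 then false
        else cohGo zero_checker negative_checker positive_checker rest rz rn (rp - 1)
      else if negative_checker && element == -1 then
        if rn == 0 then false
        else cohGo zero_checker negative_checker positive_checker rest rz (rn - 1) rp
      else cohGo zero_checker negative_checker positive_checker rest rz rn rp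

def coherency_checker_alt (zero_counter : Int) (positive_counter : Int) (negative_counter : Int) (array : List Int) (zero_checker : Bool) (negative_checker : Bool) (positive_checker : Bool) : Bool :=
  cohGo zero_checker negative_checker positive_checker array zero_counter negative_counter positive_counter

-- ===== PRECONDITION & SPEC =====
def Spec_coherency_checker (zero_counter : Int) (positive_counter : Int) (negative_counter : Int) (array : List Int) (zero_checker : Bool) (negative_checker : Bool) (positive_checker : Bool) (out : Bool) : Prop := out = coherency_checker_alt zero_counter positive_counter negative_counter array zero_checker negative_checker positive_checker
instance (zero_counter : Int) (positive_counter : Int) (negative_counter : Int) (array : List Int) (zero_checker : Bool) (negative_checker : Bool) (positive_checker : Bool) (out : Bool) : Decidable (Spec_coherency_checker zero_counter positive_counter negative_counter array zero_checker negative_checker positive_checker out) := by unfold Spec_coherency_checker; infer_instance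

-- ===== CLAIM (what is proved, stated in full; the proofs are below) =====
def Claim_equal_coherency_checker : Prop := ∀ (zero_counter : Int) (positive_counter : Int) (negative_counter : Int) (array : List Int) (zero_checker : Bool) (negative_checker : Bool) (positive_checker : Bool), Dom_coherency_checker zero_counter positive_counter negative_counter array zero_checker negative_checker positive_checker → Spec_coherency_checker zero_counter positive_counter negative_counter array zero_checker negative_checker positive_checker (coherency_checker zero_counter positive_counter negative_counter array zero_checker negative_checker positive_checker)

-- ===== LEMMAS AND PROOFS =====

-- the budget-decrement scan succeeds iff every enabled budget equals the category's count
lemma cohGo_eq (z n p : Bool) (xs : List Int) (rz rn rp : Int) :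
    cohGo z n p xs rz rn rp =
      ((!z || rz == (xs.count 0 : Int)) && (!n || rn == (xs.count (-1) : Int))
        && (!p || rp == (xs.count 1 : Int))) := by
  induction xs generalizing rz rn rp with
  | nil => simp [cohGo]
  | cons x rest ih =>
    rcases Decidable.em (x = 0) with hx0 | hx0
    · subst hx0
      cases z with
      | false => simp [cohGo, ih, List.count_cons]
      | true =>
        rcases Decidable.em (rz = 0) with hz | hz
        · subst hz
          simp only [cohGo, Bool.true_and, beq_self_eq_true, if_true, List.count_cons]
          have : ((0 : Int) == ((rest.count 0 : Nat) + 1 : Int)) = false := by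
            simp only [beq_eq_false_iff_ne]; push_cast; omega
          simp [this]
        · have hbeq : (rz == (0 : Int)) = false := by simp [hz]
          simp only [cohGo, Bool.true_and, hbeq, ih, List.count_cons]
          have : (rz - 1 == (rest.count 0 : Int)) = (rz == ((rest.count 0 : Nat) + 1 : Int)) := by
            rw [Bool.eq_iff_iff]; simp only [beq_iff_eq]; push_cast; omega
          simp [this]
    · rcases Decidable.em (x = 1) with hx1 | hx1
      · subst hx1
        cases p with
        | false => simp [cohGo, ih, List.count_cons]
        | true =>
          rcases Decidable.em (rp = 0) with hp | hp
          · subst hp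
            simp only [cohGo, List.count_cons]
            have : ((0 : Int) == ((rest.count 1 : Nat) + 1 : Int)) = false := by
              simp only [beq_eq_false_iff_ne]; push_cast; omega
            simp [this]
          · have hbeq : (rp == (0 : Int)) = false := by simp [hp]
            simp only [cohGo, List.count_cons]
            have : (rp - 1 == (rest.count 1 : Int)) = (rp == ((rest.count 1 : Nat) + 1 : Int)) := by
              rw [Bool.eq_iff_iff]; simp only [beq_iff_eq]; push_cast; omega
            simp [hbeq, ih, this]
      · rcases Decidable.em (x = -1) with hxm | hxm
        · subst hxm
          cases n with
          | false => simp [cohGo, ih, List.count_cons]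
          | true =>
            rcases Decidable.em (rn = 0) with hn | hn
            · subst hn
              simp only [cohGo, List.count_cons]
              have : ((0 : Int) == ((rest.count (-1) : Nat) + 1 : Int)) = false := by
                simp only [beq_eq_false_iff_ne]; push_cast; omega
              simp [this]
            · have hbeq : (rn == (0 : Int)) = false := by simp [hn]
              simp only [cohGo, List.count_cons]
              have : (rn - 1 == (rest.count (-1) : Int)) = (rn == ((rest.count (-1) : Nat) + 1 : Int)) := by
                rw [Bool.eq_iff_iff]; simp only [beq_iff_eq]; push_cast; omega
              simp [hbeq, ih, this]
        · simp [cohGo, ih, List.count_cons, hx0, hx1, hxm]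

-- A's tally loop computes the three counts
lemma tally_eq_counts (array : List Int) (z p n : Int) :
    array.foldl
      (fun (acc : Int × Int × Int) element =>
        if element == 0 then (acc.1 + 1, acc.2.1, acc.2.2)
        else if element == 1 then (acc.1, acc.2.1 + 1, acc.2.2)
        else if element == -1 then (acc.1, acc.2.1, acc.2.2 + 1)
        else acc)
      (z, p, n)
    = (z + (array.count 0 : Int), p + (array.count 1 : Int), n + (array.count (-1) : Int)) := by
  induction array generalizing z p n with
  | nil => simp
  | cons x xs ih =>
    simp only [List.foldl_cons, List.count_cons]
    rcases Decidable.em (x = 0) with h0 | h0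
    · subst h0
      simp only [beq_self_eq_true, if_true, ih, Prod.mk.injEq]
      refine ⟨by push_cast; ring, by simp, by simp⟩
    · rcases Decidable.em (x = 1) with h1 | h1
      · subst h1
        simp only [ih, Prod.mk.injEq]
        norm_num
        push_cast; ring
      · rcases Decidable.em (x = -1) with h2 | h2
        · subst h2
          simp only [ih, Prod.mk.injEq]
          norm_num
          push_cast; ring
        · simp only [ih, Prod.mk.injEq]
          norm_num [h0, h1, h2]

-- A's guard chain, rewritten as the conjunction cohGo_eq produces
lemma chain_eq (z n p : Bool) (a b c : Int) (za nb pc : Int) :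
    (if z && a != za then false else if n && b != nb then false
     else if p && c != pc then false else true)
    = ((!z || za == a) && (!n || nb == b) && (!p || pc == c)) := by
  cases z <;> cases n <;> cases p <;>
    by_cases h1 : a = za <;> by_cases h2 : b = nb <;> by_cases h3 : c = pc <;>
      simp [h1, h2, h3, bne, BEq.comm]

-- ===== VERDICT (by name: the statement is the Claim_ definition above) =====
theorem coherency_checker_spec : Claim_equal_coherency_checker := by
  intro zc pc nc array z n p _
  unfold Spec_coherency_checker coherency_checker coherency_checker_alt
  rw [tally_eq_counts, cohGo_eq]
  simp only [zero_add]
  exact chain_eq z n p _ _ _ zc nc pc
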